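-- pv_equiv track=rewrite | github.com/ArneBab/infocalypse | wormarc/blocks.py | has_internal_zero
-- ===== SOURCE A (Python) =====
-- def has_internal_zero(sequence):
--     """ Return True if the sequence has a zero to non-zero transition,
--         False otherwise. """
--     saw_zero = False
--     for value in sequence:
--         if value == 0:
--             saw_zero = True
--         else:
--             if saw_zero:
--                 return True
--     return False
-- ===== SOURCE B (Python) =====
-- def has_internal_zero(sequence):
--     """ Return True if the sequence has a zero to non-zero transition,
--         False otherwise. """
--     seq = list(sequence)
--     while seq and seq[-1] == 0:
--         seq.pop()
--     return 0 in seq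
-- ===== Notes on version B (the rewrite author's own statement) =====
-- stated objective: simpler
-- what changed: Instead of scanning with a saw_zero flag for a zero-then-nonzero pattern, B strips trailing zeros from the end and then answers with a plain membership test '0 in seq': a zero survives the strip exactly when some nonzero follows it.
import Mathlib
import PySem

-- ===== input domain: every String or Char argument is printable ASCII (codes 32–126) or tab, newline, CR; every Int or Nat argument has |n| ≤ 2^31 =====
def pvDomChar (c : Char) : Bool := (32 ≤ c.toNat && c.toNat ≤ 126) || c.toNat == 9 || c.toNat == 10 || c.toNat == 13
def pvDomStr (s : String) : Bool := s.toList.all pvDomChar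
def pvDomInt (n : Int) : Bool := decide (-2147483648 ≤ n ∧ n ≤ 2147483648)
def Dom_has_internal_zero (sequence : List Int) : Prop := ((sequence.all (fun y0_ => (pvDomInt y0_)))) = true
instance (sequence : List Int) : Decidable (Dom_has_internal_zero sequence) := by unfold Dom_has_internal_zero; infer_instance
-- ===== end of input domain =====

-- B strips trailing zeros then tests membership of 0, replacing A's flag-carrying scan (simpler).


-- ===== PORT A =====
-- A's single loop carrying the saw_zero flag, with early return True
def hizLoop (saw_zero : Bool) : List Int → Bool
  | [] => false
  | value :: rest =>
    if value == 0 then hizLoop true rest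
    else if saw_zero then true
    else hizLoop saw_zero rest

def has_internal_zero (sequence : List Int) : Bool := hizLoop false sequence

-- ===== PORT B =====
-- while seq and seq[-1] == 0: seq.pop()   ('seq and seq[-1] == 0' is exactly getLast? = some 0)
def hizStrip (seq : List Int) : List Int :=
  if _h : seq.getLast? = some 0 then hizStrip seq.dropLast else seq
termination_by seq.length
decreasing_by
  have hne : seq ≠ [] := by intro e; rw [e] at _h; simp at _h
  cases seq with
  | nil => exact absurd rfl hne
  | cons a l => simp [List.length_dropLast]

-- return 0 in seq
def has_internal_zero_alt (sequence : List Int) : Bool := (hizStrip sequence).contains 0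

-- ===== PRECONDITION & SPEC =====
def Spec_has_internal_zero (sequence : List Int) (out : Bool) : Prop := out = has_internal_zero_alt sequence
instance (sequence : List Int) (out : Bool) : Decidable (Spec_has_internal_zero sequence out) := by unfold Spec_has_internal_zero; infer_instance

-- ===== CLAIM (what is proved, stated in full; the proofs are below) =====
def Claim_equal_has_internal_zero : Prop := ∀ (sequence : List Int), Dom_has_internal_zero sequence → Spec_has_internal_zero sequence (has_internal_zero sequence)

-- ===== LEMMAS AND PROOFS =====

-- the strip loop computes: reverse, drop leading zeros, reverse back
theorem hizStrip_eq (s : List Int) :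
    hizStrip s = (s.reverse.dropWhile (fun v : Int => v == 0)).reverse := by
  induction s using List.reverseRecOn with
  | nil => simp [hizStrip]
  | append_singleton s a ih =>
    rw [hizStrip]
    by_cases ha : a = 0
    · subst ha
      simp [ih]
    · have : ((s ++ [a]).getLast? = some 0) = False := by
        simp [ha]
      simp only [this, dite_false]
      rw [List.reverse_append]
      simp [ha]

-- A's loop once a zero was seen: true iff some later value is nonzero
theorem hizLoop_true (l : List Int) : hizLoop true l = !(l.all (fun v : Int => v == 0)) := by
  induction l with
  | nil => rfl
  | cons v r ih =>
    by_cases hv : v = 0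
    · subst hv; simp [hizLoop, ih]
    · simp [hizLoop, hv]

theorem hiz_main (s : List Int) :
    hizLoop false s = ((s.reverse.dropWhile (fun v : Int => v == 0)).reverse).contains 0 := by
  induction s with
  | nil => rfl
  | cons v rest ih =>
    rw [List.reverse_cons, List.dropWhile_append]
    by_cases hr : rest.reverse.dropWhile (fun v : Int => v == 0) = []
    · have hall : rest.all (fun v : Int => v == 0) = true := by
        have := List.dropWhile_eq_nil_iff.mp hr
        simp only [List.all_eq_true]
        intro x hx
        exact this x (List.mem_reverse.mpr hx)
      by_cases hv : v = 0
      · subst hv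
        simp [hizLoop, hizLoop_true, hall, hr, List.dropWhile]
      · have : hizLoop false rest = false := by
          rw [ih, hr]; simp
        have hb : (v == 0) = false := by simpa using hv
        simp [hizLoop, this, hr, List.dropWhile, hb]
        exact fun h => absurd h.symm hv
    · have hall : rest.all (fun v : Int => v == 0) = false := by
        by_contra hcon
        have : rest.all (fun v : Int => v == 0) = true := by
          cases h : rest.all (fun v : Int => v == 0) <;> simp_all
        exact hr (List.dropWhile_eq_nil_iff.mpr (by
          intro x hx
          exact (List.all_eq_true.mp this) x (List.mem_reverse.mp hx)))
      by_cases hv : v = 0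
      · subst hv
        simp [hizLoop, hizLoop_true, hall, hr]
      · simp [hizLoop, hv, ih, hr]
        intro h
        exact absurd h.symm hv

-- ===== VERDICT (by name: the statement is the Claim_ definition above) =====
theorem has_internal_zero_spec : Claim_equal_has_internal_zero := by
  intro s _
  unfold Spec_has_internal_zero has_internal_zero has_internal_zero_alt
  rw [hiz_main, hizStrip_eq]
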